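-- pv_equiv track=rewrite | github.com/StevenMaio/Coding-Problems | problem12/problem12.py | way_up_n_steps_helper
-- ===== SOURCE A (Python) =====
-- def way_up_n_steps_helper(k, x, paths_dict):
--     if (k < 0):
--         return 0
--     elif k in paths_dict.keys():
--         return paths_dict[k]
--     else:
--         paths = 0
--
--         if k in x:
--             paths += 1
--
--         for i in x:
--             paths += way_up_n_steps_helper(k - i, x, paths_dict)
--
--         paths_dict[k] = paths
--
--         return paths
-- ===== SOURCE B (Python) =====
-- def way_up_n_steps_helper(k, x, paths_dict):
--     if k < 0:
--         return 0
--     if k in paths_dict: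
--         return paths_dict[k]
--     if not x:
--         return 0
--     dp = []
--     for v in range(k + 1):
--         if v in paths_dict:
--             dp.append(paths_dict[v])
--         else:
--             total = 1 if v in x else 0
--             for i in x:
--                 if v - i >= 0:
--                     total += dp[v - i]
--             dp.append(total)
--     return dp[k]
-- ===== Notes on version B (the rewrite author's own statement) =====
-- stated objective: alternative
-- what changed: Replaced the memoized top-down recursion that threads a mutable cache dict with an iterative bottom-up DP table filled for 0..k (seeded entries of paths_dict are used where present); B does not mutate paths_dict.
-- outside the precondition, e.g. on way_up_n_steps_helper(5, [0], {}): A raises RecursionError, B raises IndexError; on way_up_n_steps_helper(4, [-3], {13: 3, 10: 1, 184: 7, 6: 9, 2: -3}): A returns 1, B raises IndexError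
import Mathlib
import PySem

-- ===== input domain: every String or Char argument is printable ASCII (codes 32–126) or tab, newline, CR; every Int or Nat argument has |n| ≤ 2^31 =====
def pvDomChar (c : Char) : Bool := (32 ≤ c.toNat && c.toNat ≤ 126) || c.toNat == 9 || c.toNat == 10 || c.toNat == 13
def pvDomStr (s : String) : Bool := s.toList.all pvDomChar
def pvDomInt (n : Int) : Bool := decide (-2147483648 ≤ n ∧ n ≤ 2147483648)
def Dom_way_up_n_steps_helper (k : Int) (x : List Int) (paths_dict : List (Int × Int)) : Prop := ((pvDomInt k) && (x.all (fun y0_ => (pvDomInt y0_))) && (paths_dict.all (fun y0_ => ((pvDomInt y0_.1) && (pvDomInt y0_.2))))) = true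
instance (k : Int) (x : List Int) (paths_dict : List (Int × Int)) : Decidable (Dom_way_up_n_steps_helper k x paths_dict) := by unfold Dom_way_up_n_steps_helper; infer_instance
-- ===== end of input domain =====

-- B replaces A's memoized top-down recursion (which mutates paths_dict as a cache) with an
-- iterative bottom-up DP table for 0..k that reads pre-seeded paths_dict entries; the
-- equivalence proved here is about the RETURN value only (A mutates paths_dict, B does not).

-- ===== PORT A =====
-- A's recursion, fuel-indexed (under Pre_ the fuel k.toNat+1 is never exhausted: every
-- recursive call strictly decreases a nonnegative k, since Pre_ demands 1 ≤ i for i ∈ x);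
-- the cache dict is threaded through as state, exactly as Python mutates it.
def goA (fuel : Nat) (k : Int) (x : List Int) (d : PySem.Dict Int Int) : Int × PySem.Dict Int Int :=
  match fuel with
  | 0 => (0, d)
  | fuel + 1 =>
    if k < 0 then (0, d)
    else
      match d.get? k with
      | some v => (v, d)
      | none =>
        let paths0 : Int := if k ∈ x then 1 else 0
        let res := x.foldl (fun acc i =>
          let r := goA fuel (k - i) x acc.2
          (acc.1 + r.1, r.2)) (paths0, d)
        (res.1, res.2.insert k res.1)

def way_up_n_steps_helper (k : Int) (x : List Int) (paths_dict : List (Int × Int)) : Int :=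
  (goA (k.toNat + 1) k x (PySem.Dict.ofList paths_dict)).1

-- ===== PORT B =====
-- one bottom-up step: the value at v, from the seed dict if present, else from the table
def stepVal (x : List Int) (d : PySem.Dict Int Int) (dp : List Int) (v : Int) : Int :=
  match d.get? v with
  | some s => s
  | none =>
    (if v ∈ x then (1 : Int) else 0) +
      x.foldl (fun acc i => acc + (if 0 ≤ v - i then dp[(v - i).toNat]! else 0)) 0

def way_up_n_steps_helper_alt (k : Int) (x : List Int) (paths_dict : List (Int × Int)) : Int :=
  if k < 0 then 0
  else
    let d := PySem.Dict.ofList paths_dict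
    match d.get? k with
    | some v => v
    | none =>
      if x = [] then 0
      else
        let dp := (PySem.List.pyRange 0 (k + 1) 1).foldl (fun dp v => dp ++ [stepVal x d dp v]) []
        dp[k.toNat]!

-- ===== PRECONDITION & SPEC =====
-- Unless A answers without recursing (k < 0, empty x, or k already cached), Pre_ requires all
-- steps ≥ 1: with a non-positive step A's recursion climbs upward and either never bottoms out
-- (RecursionError) or, when an upward chain happens to end in a pre-seeded cache entry, returns
-- a value that B (whose bottom-up table cannot look upward) cannot produce — B raises
-- IndexError on exactly those inputs, so they lie outside Pre_.
def Pre_way_up_n_steps_helper (k : Int) (x : List Int) (paths_dict : List (Int × Int)) : Prop :=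
  (∀ i ∈ x, 1 ≤ i) ∨ k < 0 ∨ x = [] ∨ (PySem.Dict.ofList paths_dict).contains k = true
instance (k : Int) (x : List Int) (paths_dict : List (Int × Int)) : Decidable (Pre_way_up_n_steps_helper k x paths_dict) := by unfold Pre_way_up_n_steps_helper; infer_instance

def pvWitness_way_up_n_steps_helper : Int × List Int × (List (Int × Int)) := (10, [1, 2], [(3, 5)])

def Spec_way_up_n_steps_helper (k : Int) (x : List Int) (paths_dict : List (Int × Int)) (out : Int) : Prop := out = way_up_n_steps_helper_alt k x paths_dict
instance (k : Int) (x : List Int) (paths_dict : List (Int × Int)) (out : Int) : Decidable (Spec_way_up_n_steps_helper k x paths_dict out) := by unfold Spec_way_up_n_steps_helper; infer_instance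

-- ===== CLAIM (what is proved, stated in full; the proofs are below) =====
def Claim_equal_way_up_n_steps_helper : Prop := ∀ (k : Int) (x : List Int) (paths_dict : List (Int × Int)), Dom_way_up_n_steps_helper k x paths_dict → Pre_way_up_n_steps_helper k x paths_dict → Spec_way_up_n_steps_helper k x paths_dict (way_up_n_steps_helper k x paths_dict)

-- ===== LEMMAS AND PROOFS =====

-- the mathematical value both programs compute: the seed value where d0 is seeded,
-- else (v ∈ x) + Σ_{i ∈ x} g (v - i); fuel-indexed
def gF (x : List Int) (d0 : PySem.Dict Int Int) : Nat → Int → Int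
  | 0, _ => 0
  | f + 1, k =>
    if k < 0 then 0
    else
      match d0.get? k with
      | some v => v
      | none => (if k ∈ x then (1 : Int) else 0) + x.foldl (fun acc i => acc + gF x d0 f (k - i)) 0

theorem gF_neg (x : List Int) (d0 : PySem.Dict Int Int) (f : Nat) (k : Int) (hk : k < 0) :
    gF x d0 f k = 0 := by
  cases f <;> simp [gF, hk]

theorem gF_irrel (x : List Int) (d0 : PySem.Dict Int Int) (hx : ∀ i ∈ x, 1 ≤ i) :
    ∀ (f1 : Nat) (f2 : Nat) (k : Int), k.toNat < f1 → k.toNat < f2 →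
      gF x d0 f1 k = gF x d0 f2 k := by
  intro f1
  induction f1 with
  | zero => omega
  | succ f ih =>
    intro f2 k h1 h2
    match f2, h2 with
    | f2 + 1, h2 =>
      by_cases hk : k < 0
      · simp [gF, hk]
      · simp only [gF, hk, if_false]
        cases d0.get? k with
        | some v => rfl
        | none =>
          simp only
          congr 1
          apply PySem.List.foldl_congr_mem
          intro acc i hi
          congr 1
          by_cases hki : k - i < 0
          · rw [gF_neg _ _ _ _ hki, gF_neg _ _ _ _ hki]
          · exact ih f2 (k - i) (by have := hx i hi; omega) (by have := hx i hi; omega)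

def gfun (x : List Int) (d0 : PySem.Dict Int Int) (k : Int) : Int := gF x d0 (k.toNat + 1) k

theorem gfun_neg (x : List Int) (d0 : PySem.Dict Int Int) (k : Int) (hk : k < 0) :
    gfun x d0 k = 0 := gF_neg _ _ _ _ hk

theorem gfun_hit (x : List Int) (d0 : PySem.Dict Int Int) (k : Int) (v : Int)
    (hk : ¬ k < 0) (h : d0.get? k = some v) : gfun x d0 k = v := by
  simp [gfun, gF, hk, h]

theorem gfun_miss (x : List Int) (d0 : PySem.Dict Int Int) (hx : ∀ i ∈ x, 1 ≤ i) (k : Int)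
    (hk : ¬ k < 0) (h : d0.get? k = none) :
    gfun x d0 k = (if k ∈ x then (1 : Int) else 0) + (x.map (fun i => gfun x d0 (k - i))).sum := by
  have h1 : gfun x d0 k
      = (if k ∈ x then (1 : Int) else 0) + x.foldl (fun acc i => acc + gF x d0 k.toNat (k - i)) 0 := by
    rw [gfun, gF]
    simp [hk, h]
  have h2 : ∀ i ∈ x, gF x d0 k.toNat (k - i) = gfun x d0 (k - i) := by
    intro i hi
    by_cases hki : k - i < 0
    · rw [gF_neg _ _ _ _ hki, gfun_neg _ _ _ hki]
    · exact gF_irrel x d0 hx _ _ (k - i) (by have := hx i hi; omega) (by omega)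
  rw [h1, PySem.List.foldl_add, zero_add, List.map_congr_left h2]

-- invariant on the threaded cache: keys of d0 are still present, and every stored
-- nonnegative key holds its gfun value (seeded keys do, by gfun_hit)
def CacheInv (x : List Int) (d0 d : PySem.Dict Int Int) : Prop :=
  ∀ j : Int, 0 ≤ j →
    (d0.get? j ≠ none → d.get? j ≠ none) ∧ (∀ v, d.get? j = some v → v = gfun x d0 j)

theorem goA_neg (fuel : Nat) (k : Int) (x : List Int) (d : PySem.Dict Int Int) (hk : k < 0) :
    goA fuel k x d = (0, d) := by
  cases fuel <;> simp [goA, hk]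

theorem goA_main (x : List Int) (d0 : PySem.Dict Int Int) (hx : ∀ i ∈ x, 1 ≤ i) :
    ∀ (fuel : Nat) (k : Int) (d : PySem.Dict Int Int), 0 ≤ k → k.toNat < fuel → CacheInv x d0 d →
      (goA fuel k x d).1 = gfun x d0 k ∧ CacheInv x d0 (goA fuel k x d).2 := by
  intro fuel
  induction fuel with
  | zero => omega
  | succ f ih =>
    intro k d hk hf hinv
    have hk' : ¬ k < 0 := by omega
    simp only [goA, hk', if_false]
    cases hd : d.get? k with
    | some v =>
      exact ⟨(hinv k hk).2 v hd, hinv⟩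
    | none =>
      have hd0 : d0.get? k = none := by
        by_contra h
        exact ((hinv k hk).1 h) hd
      -- the fold over x accumulates the sum of gfun (k - i) while preserving CacheInv
      have fold : ∀ (l : List Int), (∀ i ∈ l, 1 ≤ i) → ∀ (p : Int) (d' : PySem.Dict Int Int),
          CacheInv x d0 d' →
          (l.foldl (fun acc i =>
            let r := goA f (k - i) x acc.2
            (acc.1 + r.1, r.2)) (p, d')).1 = p + (l.map (fun i => gfun x d0 (k - i))).sum ∧
          CacheInv x d0 (l.foldl (fun acc i =>
            let r := goA f (k - i) x acc.2
            (acc.1 + r.1, r.2)) (p, d')).2 := by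
        intro l
        induction l with
        | nil => intro _ p d' hinv'; exact ⟨by simp, hinv'⟩
        | cons i l ihl =>
          intro hl p d' hinv'
          have hi : 1 ≤ i := hl i (by simp)
          by_cases hki : k - i < 0
          · have hr : goA f (k - i) x d' = (0, d') := goA_neg _ _ _ _ hki
            have := ihl (fun j hj => hl j (by simp [hj])) (p + 0) d' hinv'
            simp only [List.foldl_cons, hr, List.map_cons, List.sum_cons,
              gfun_neg x d0 _ hki] at *
            constructor
            · rw [this.1]; ring
            · exact this.2
          · have hki' : 0 ≤ k - i := by omega
            have hfr : (k - i).toNat < f := by omega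
            have hr := ih (k - i) d' hki' hfr hinv'
            have := ihl (fun j hj => hl j (by simp [hj])) (p + (goA f (k - i) x d').1)
              (goA f (k - i) x d').2 hr.2
            simp only [List.foldl_cons, List.map_cons, List.sum_cons] at *
            constructor
            · rw [this.1, hr.1]; ring
            · exact this.2
      have hfold := fold x hx (if k ∈ x then (1 : Int) else 0) d hinv
      set res := x.foldl (fun acc i =>
        let r := goA f (k - i) x acc.2
        (acc.1 + r.1, r.2)) ((if k ∈ x then (1 : Int) else 0), d) with hres
      have hval : res.1 = gfun x d0 k := by
        rw [hfold.1, gfun_miss x d0 hx k hk' hd0]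
      refine ⟨hval, ?_⟩
      intro j hj
      constructor
      · intro h0
        rw [PySem.Dict.get?_insert]
        by_cases hjk : j = k
        · simp [hjk]
        · simp only [hjk, if_false]
          exact (hfold.2 j hj).1 h0
      · intro v hv
        rw [PySem.Dict.get?_insert] at hv
        by_cases hjk : j = k
        · simp only [hjk, if_true] at hv
          subst hjk
          cases hv
          exact hval
        · simp only [hjk, if_false] at hv
          exact (hfold.2 j hj).2 v hv

-- B-side: the dp table holds gfun at every filled index
theorem dp_table (x : List Int) (d0 : PySem.Dict Int Int) (hx : ∀ i ∈ x, 1 ≤ i) :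
    ∀ n : Nat,
      ((PySem.List.pyRange 0 (n : Int) 1).foldl
        (fun dp v => dp ++ [stepVal x d0 dp v]) []).length = n ∧
      ∀ j : Nat, j < n →
        ((PySem.List.pyRange 0 (n : Int) 1).foldl
          (fun dp v => dp ++ [stepVal x d0 dp v]) [])[j]! = gfun x d0 (j : Int) := by
  intro n
  induction n with
  | zero =>
    constructor
    · simp
    · omega
  | succ n ih =>
    obtain ⟨hlen, hval⟩ := ih
    have hsplit : PySem.List.pyRange 0 ((n : Int) + 1) 1 =
        PySem.List.pyRange 0 (n : Int) 1 ++ [(n : Int)] :=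
      PySem.List.pyRange_one_succ_right (by omega)
    have hcast : (((n + 1 : Nat)) : Int) = (n : Int) + 1 := by push_cast; ring
    rw [hcast, hsplit, List.foldl_append]
    set dp := (PySem.List.pyRange 0 (n : Int) 1).foldl
      (fun dp v => dp ++ [stepVal x d0 dp v]) [] with hdp
    simp only [List.foldl_cons, List.foldl_nil]
    have hstep : stepVal x d0 dp (n : Int) = gfun x d0 (n : Int) := by
      cases hd : d0.get? (n : Int) with
      | some s =>
        simp only [stepVal, hd]
        exact (gfun_hit x d0 _ s (by omega) hd).symm
      | none =>
        simp only [stepVal, hd]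
        have h2 : ∀ i ∈ x, (if 0 ≤ (n : Int) - i then dp[((n : Int) - i).toNat]! else 0)
            = gfun x d0 ((n : Int) - i) := by
          intro i hi
          by_cases hni : 0 ≤ (n : Int) - i
          · have hi1 := hx i hi
            have hlt : ((n : Int) - i).toNat < n := by omega
            rw [if_pos hni, hval _ hlt]
            congr 1
            omega
          · rw [if_neg hni, gfun_neg x d0 _ (by omega)]
        rw [gfun_miss x d0 hx _ (by omega) hd, PySem.List.foldl_add, zero_add,
          List.map_congr_left h2]
    refine ⟨by simp [hlen], ?_⟩
    intro j hj
    rcases Nat.lt_or_ge j n with hjn | hjn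
    · rw [getElem!_pos _ _ (by simp [hlen]; omega),
        List.getElem_append_left (by omega), ← getElem!_pos _ _ (by omega)]
      exact hval j hjn
    · have hj' : j = n := by omega
      subst hj'
      rw [getElem!_pos _ _ (by simp [hlen]),
        List.getElem_append_right (by omega)]
      simp [hlen, hstep]

-- ===== VERDICT (by name: the statement is the Claim_ definition above) =====
theorem way_up_n_steps_helper_spec : Claim_equal_way_up_n_steps_helper := by
  intro k x paths_dict _ hpre
  unfold Spec_way_up_n_steps_helper
  set d0 := PySem.Dict.ofList paths_dict with hd0def
  by_cases hk : k < 0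
  · unfold way_up_n_steps_helper way_up_n_steps_helper_alt
    rw [if_pos hk, goA_neg _ _ _ _ hk]
  · have hk0 : 0 ≤ k := by omega
    cases hd : d0.get? k with
    | some v =>
      unfold way_up_n_steps_helper way_up_n_steps_helper_alt
      simp [goA, hk, ← hd0def, hd]
    | none =>
      by_cases hxe : x = []
      · subst hxe
        unfold way_up_n_steps_helper way_up_n_steps_helper_alt
        simp [goA, hk, ← hd0def, hd]
      · have hx : ∀ i ∈ x, 1 ≤ i := by
          rcases hpre with hx | hk' | hxe' | hc
          · exact hx
          · omega
          · exact absurd hxe' hxe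
          · rw [← hd0def] at hc
            rw [PySem.Dict.get?_eq_none_iff_contains] at hd
            rw [hc] at hd
            cases hd
        have hinv0 : CacheInv x d0 d0 := by
          intro j hj
          refine ⟨fun h => h, fun v hv => ?_⟩
          exact (gfun_hit x d0 j v (by omega) hv).symm
        have hA : way_up_n_steps_helper k x paths_dict = gfun x d0 k := by
          unfold way_up_n_steps_helper
          exact (goA_main x d0 hx (k.toNat + 1) k d0 hk0 (by omega) hinv0).1
        rw [hA]
        unfold way_up_n_steps_helper_alt
        rw [if_neg hk]
        simp only [← hd0def]
        rw [hd]
        simp only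
        rw [if_neg hxe]
        have hcast : k + 1 = ((k.toNat + 1 : Nat) : Int) := by omega
        rw [hcast]
        have := (dp_table x d0 hx (k.toNat + 1)).2 k.toNat (by omega)
        rw [this]
        congr 1
        omega
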